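-- pv_equiv track=rewrite | github.com/trmttm/fmIDE | src/Utilities/auto_complete.py | search_filter
-- ===== SOURCE A (Python) =====
-- from typing import Tuple
--
-- def search_filter(candidate: str, search_words: str) -> Tuple[bool, int]:
--     next_candidate = candidate
--     if search_words.lower() == candidate.lower():
--         rank = 0  # Matches completely
--         return True, rank
--     elif search_words.lower() in candidate[:len(search_words)].lower():
--         rank = 1  # Matches so far
--         return True, rank
--     elif search_words.lower() in candidate.lower():
--         rank = 2  # Contains
--         return True, rank
--
--     rank = 0
--     for n, element in enumerate(search_words):
--         try:
--             index_ = next_candidate.lower().index(element.lower())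
--         except ValueError:
--             return False, rank  # rank does not matter for False / eliminated candidates
--         next_candidate = next_candidate[index_:]
--
--     rank = 3
--     return True, rank
-- ===== SOURCE B (Python) =====
-- def search_filter(candidate, search_words):
--     c = candidate.lower()
--     s = search_words.lower()
--     if s == c:
--         return True, 0
--     if c.startswith(s):
--         return True, 1
--     if s in c:
--         return True, 2
--     # fuzzy match: the search letters must appear in the candidate in this order,
--     # where a run of the same letter only needs to occur once
--     letters = []
--     for ch in s:
--         if not letters or letters[-1] != ch:
--             letters.append(ch)
--     it = iter(c)
--     ok = all(ch in it for ch in letters)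
--     return (True, 3) if ok else (False, 0)
-- ===== Notes on version B (the rewrite author's own statement) =====
-- stated objective: faster
-- what changed: Replaced A's per-character index()/slice rescans (which re-lower the whole remaining candidate on every iteration) by collapsing repeated adjacent search letters once and doing a single forward iterator-based subsequence scan over the once-lowercased strings.
import Mathlib
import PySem

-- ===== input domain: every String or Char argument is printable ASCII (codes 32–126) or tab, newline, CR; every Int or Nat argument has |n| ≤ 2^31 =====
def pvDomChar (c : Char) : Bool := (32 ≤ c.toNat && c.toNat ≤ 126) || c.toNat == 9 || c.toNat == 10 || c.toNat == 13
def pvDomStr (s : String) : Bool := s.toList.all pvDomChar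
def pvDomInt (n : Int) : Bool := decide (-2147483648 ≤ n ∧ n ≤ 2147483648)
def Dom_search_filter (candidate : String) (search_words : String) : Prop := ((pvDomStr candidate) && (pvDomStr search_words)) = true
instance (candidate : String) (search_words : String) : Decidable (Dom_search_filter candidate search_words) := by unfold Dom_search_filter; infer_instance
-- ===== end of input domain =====

-- B replaces A's per-character index/slice rescans (which re-lower the remaining candidate on every
-- iteration) by collapsing repeated adjacent search letters once and doing a single forward
-- iterator-based subsequence scan over the once-lowercased strings; same return value.

-- ===== PORT A =====
-- the 'for n, element in enumerate(search_words)' loop: state = next_candidate;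
-- .index is Chars.find (-1 = ValueError caught), next_candidate[index_:] is List.slice
def sfLoopA : List Char → List Char → Bool × Int
  | [], _ => (true, 3)
  | e :: rest, nc =>
    let index_ := PySem.Chars.find (PySem.Chars.lower nc) [PySem.Chars.lowerChar e]
    if index_ = -1 then (false, 0)
    else sfLoopA rest (PySem.List.slice nc (some index_))

def search_filter (candidate : String) (search_words : String) : Bool × Int :=
  if PySem.Chars.lower search_words.toList = PySem.Chars.lower candidate.toList then (true, 0)
  else if PySem.Chars.isIn (PySem.Chars.lower search_words.toList)
      (PySem.Chars.lower (PySem.List.slice candidate.toList none (some (PySem.Chars.len search_words.toList)))) then (true, 1)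
  else if PySem.Chars.isIn (PySem.Chars.lower search_words.toList) (PySem.Chars.lower candidate.toList) then (true, 2)
  else sfLoopA search_words.toList candidate.toList

-- ===== PORT B =====
-- 'ch in it' on an iterator over the candidate: consume it up to and through the first ch
-- (none = the iterator is exhausted without finding ch)
def takeAfter? (ch : Char) : List Char → Option (List Char)
  | [] => none
  | x :: xs => if x = ch then some xs else takeAfter? ch xs

-- 'all(ch in it for ch in letters)' with it = iter(c)
def allInIter : List Char → List Char → Bool
  | [], _ => true
  | ch :: rest, it =>
    match takeAfter? ch it with
    | none => false
    | some it' => allInIter rest it'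

def search_filter_alt (candidate : String) (search_words : String) : Bool × Int :=
  let c := PySem.Chars.lower candidate.toList
  let s := PySem.Chars.lower search_words.toList
  if s = c then (true, 0)
  else if PySem.Chars.startswith c s then (true, 1)
  else if PySem.Chars.isIn s c then (true, 2)
  else
    -- the 'for ch in s: if not letters or letters[-1] != ch: letters.append(ch)' loop
    let letters := s.foldl
      (fun letters ch =>
        if letters = [] ∨ ¬ PySem.List.pyGet? letters (-1) = some ch then letters ++ [ch] else letters) []
    let ok := allInIter letters c
    if ok then (true, 3) else (false, 0)

-- ===== PRECONDITION & SPEC =====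
def Spec_search_filter (candidate : String) (search_words : String) (out : Bool × Int) : Prop := out = search_filter_alt candidate search_words
instance (candidate : String) (search_words : String) (out : Bool × Int) : Decidable (Spec_search_filter candidate search_words out) := by unfold Spec_search_filter; infer_instance

-- ===== CLAIM (what is proved, stated in full; the proofs are below) =====
def Claim_equal_search_filter : Prop := ∀ (candidate : String) (search_words : String), Dom_search_filter candidate search_words → Spec_search_filter candidate search_words (search_filter candidate search_words)

-- ===== LEMMAS AND PROOFS =====

theorem find_go_singleton (c : Char) (l : List Char) (k : Nat) :
    PySem.Chars.find.go [c] l k =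
      (match l.idxOf? c with | none => -1 | some i => ((k + i : Nat) : Int)) := by
  induction l generalizing k with
  | nil => simp [PySem.Chars.find.go]
  | cons h t ih =>
    rw [PySem.Chars.find.go]
    by_cases hc : h = c
    · subst hc
      simp [List.isPrefixOf, List.idxOf?_cons]
    · have hbe : (c == h) = false := beq_eq_false_iff_ne.mpr (Ne.symm hc)
      have hbe2 : (h == c) = false := beq_eq_false_iff_ne.mpr hc
      simp only [List.isPrefixOf, hbe, hbe2, List.idxOf?_cons, ih]
      cases ht : t.idxOf? c with
      | none => simp
      | some i => simp; ring

theorem find_singleton (l : List Char) (c : Char) :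
    PySem.Chars.find l [c] = (match l.idxOf? c with | none => -1 | some i => (i : Int)) := by
  have := find_go_singleton c l 0
  simp only [PySem.Chars.find, this]
  cases l.idxOf? c <;> simp

-- A's loop, cleaned up to first-occurrence index + drop
def aSpec : List Char → List Char → Bool
  | _, [] => true
  | cl, e :: rest =>
    match cl.idxOf? e with
    | none => false
    | some i => aSpec (cl.drop i) rest

theorem sfLoopA_eq (sw : List Char) : ∀ nc : List Char,
    sfLoopA sw nc =
      if aSpec (PySem.Chars.lower nc) (sw.map PySem.Chars.lowerChar) then (true, 3) else (false, 0) := by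
  induction sw with
  | nil => intro nc; simp [sfLoopA, aSpec]
  | cons e rest ih =>
    intro nc
    rw [sfLoopA]
    simp only [find_singleton, List.map_cons]
    cases hidx : (PySem.Chars.lower nc).idxOf? (PySem.Chars.lowerChar e) with
    | none => simp [aSpec, hidx]
    | some i =>
      have h0 : ((i : Int) = -1) = False := by
        simp only [eq_iff_iff, iff_false]
        omega
      simp only [h0, if_false]
      rw [PySem.List.slice_from nc (a := (i : Int)) (by omega)]
      simp only [Int.toNat_natCast, ih]
      have hdl : PySem.Chars.lower (nc.drop i) = (PySem.Chars.lower nc).drop i := by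
        simp [PySem.Chars.lower, List.map_drop]
      rw [hdl]
      have : aSpec (PySem.Chars.lower nc) (PySem.Chars.lowerChar e :: rest.map PySem.Chars.lowerChar)
          = aSpec ((PySem.Chars.lower nc).drop i) (rest.map PySem.Chars.lowerChar) := by
        simp [aSpec, hidx]
      simp only [this]

-- the nondecreasing-position matcher A's loop implements (a candidate character may be reused)
def greedy : List Char → List Char → Bool
  | _, [] => true
  | [], _ :: _ => false
  | c :: cl, e :: r => if c = e then greedy (c :: cl) r else greedy cl (e :: r)
termination_by cl s => cl.length + s.length

theorem aSpec_eq_greedy : ∀ (cl s : List Char), aSpec cl s = greedy cl s := by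
  intro cl s
  induction cl, s using greedy.induct with
  | case1 x => simp [aSpec, greedy]
  | case2 head tail => simp [aSpec, greedy]
  | case3 cl e r ih =>
    have h0 : (e :: cl).idxOf? e = some 0 := by simp [List.idxOf?_cons]
    have hg : greedy (e :: cl) (e :: r) = greedy (e :: cl) r := by rw [greedy]; simp
    rw [hg, ← ih]
    simp [aSpec, h0]
  | case4 c cl e r hce ih =>
    have hg : greedy (c :: cl) (e :: r) = greedy cl (e :: r) := by rw [greedy]; simp [hce]
    rw [hg, ← ih]
    have hbe : (c == e) = false := beq_eq_false_iff_ne.mpr hce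
    cases ht : cl.idxOf? e with
    | none => simp [aSpec, List.idxOf?_cons, hbe, ht]
    | some i => simp [aSpec, List.idxOf?_cons, hbe, ht]

-- the strict one-use matcher B's iterator scan implements (text, pattern)
def scan : List Char → List Char → Bool
  | _, [] => true
  | [], _ :: _ => false
  | c :: cl, e :: r => if c = e then scan cl r else scan cl (e :: r)

theorem destutter'_head (a : Char) (l : List Char) :
    ∃ t, List.destutter' (· ≠ ·) a l = a :: t := by
  induction l generalizing a with
  | nil => exact ⟨[], rfl⟩
  | cons b t ih =>
    by_cases h : a = b
    · subst h
      obtain ⟨t', ht⟩ := ih a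
      exact ⟨t', by simpa [List.destutter'] using ht⟩
    · exact ⟨List.destutter' (· ≠ ·) b t, by simp [List.destutter', h]⟩

theorem greedy_eq_scan_destutter : ∀ (cl s : List Char), greedy cl s = scan cl (s.destutter (· ≠ ·)) := by
  intro cl s
  induction cl, s using greedy.induct with
  | case1 cl => cases cl <;> simp [greedy, List.destutter, scan]
  | case2 e r =>
    obtain ⟨t, ht⟩ := destutter'_head e r
    simp [greedy, List.destutter, ht, scan]
  | case3 cl e r ih =>
    have hg : greedy (e :: cl) (e :: r) = greedy (e :: cl) r := by rw [greedy]; simp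
    rw [hg, ih]
    cases r with
    | nil => simp [List.destutter, List.destutter', scan]
    | cons f r' =>
      by_cases hef : e = f
      · subst hef; simp [List.destutter, List.destutter']
      · obtain ⟨t, ht⟩ := destutter'_head f r'
        simp [List.destutter, List.destutter', hef, ht, scan]
  | case4 c cl e r hce ih =>
    have hg : greedy (c :: cl) (e :: r) = greedy cl (e :: r) := by rw [greedy]; simp [hce]
    rw [hg, ih]
    obtain ⟨t, ht⟩ := destutter'_head e r
    simp [List.destutter, ht, scan, hce]

-- B's dedup loop builds exactly the adjacent-dedup of s
theorem dedupStep_append (s : List Char) : ∀ (acc : List Char) (a : Char),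
    s.foldl (fun letters ch =>
        if letters = [] ∨ ¬ PySem.List.pyGet? letters (-1) = some ch then letters ++ [ch] else letters)
      (acc ++ [a]) = acc ++ List.destutter' (· ≠ ·) a s := by
  induction s with
  | nil => intro acc a; simp [List.destutter']
  | cons ch rest ih =>
    intro acc a
    rw [List.foldl_cons]
    have hlast : PySem.List.pyGet? (acc ++ [a]) (-1) = some a := by
      simp [PySem.List.pyGet?_neg_one]
    by_cases hac : a = ch
    · subst hac
      have hcond : ¬ ((acc ++ [a]) = [] ∨ ¬ PySem.List.pyGet? (acc ++ [a]) (-1) = some a) := by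
        rw [hlast]; simp
      rw [if_neg hcond, ih acc a]
      simp [List.destutter']
    · have hcond : ((acc ++ [a]) = [] ∨ ¬ PySem.List.pyGet? (acc ++ [a]) (-1) = some ch) := by
        right; rw [hlast]; simp [hac]
      rw [if_pos hcond, ih (acc ++ [a]) ch, List.append_assoc]
      simp [List.destutter', hac]

theorem dedup_eq (s : List Char) :
    s.foldl (fun letters ch =>
        if letters = [] ∨ ¬ PySem.List.pyGet? letters (-1) = some ch then letters ++ [ch] else letters) []
      = s.destutter (· ≠ ·) := by
  cases s with
  | nil => rfl
  | cons ch rest =>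
    rw [List.foldl_cons, if_pos (Or.inl rfl)]
    have := dedupStep_append rest [] ch
    simpa [List.destutter] using this

-- B's iterator scan is the strict matcher
theorem allInIter_eq_scan : ∀ (c p : List Char), allInIter p c = scan c p := by
  intro c
  induction c with
  | nil => intro p; cases p <;> simp [allInIter, takeAfter?, scan]
  | cons x cl ih =>
    intro p
    cases p with
    | nil => simp [allInIter, scan]
    | cons e r =>
      by_cases h : x = e
      · subst h
        simp [allInIter, takeAfter?, scan, ih]
      · have hne : ¬ x = e := h
        rw [scan, if_neg hne, ← ih (e :: r)]
        simp [allInIter, takeAfter?, hne]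

-- A's fallback loop in terms of the strict matcher on the deduped search letters
theorem fallbackA_eq (candidate search_words : String) :
    sfLoopA search_words.toList candidate.toList =
      if scan (PySem.Chars.lower candidate.toList) ((PySem.Chars.lower search_words.toList).destutter (· ≠ ·))
      then ((true : Bool), (3 : Int)) else (false, 0) := by
  have hlow : search_words.toList.map PySem.Chars.lowerChar = PySem.Chars.lower search_words.toList := rfl
  rw [sfLoopA_eq, hlow, aSpec_eq_greedy, greedy_eq_scan_destutter]

-- branch 2 of A equals B's startswith test
theorem infix_take_iff_prefix (s t : List Char) :
    s <:+: t.take s.length ↔ s <+: t := by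
  constructor
  · intro h
    have hl : (t.take s.length).length ≤ s.length := by simp
    have heq : s = t.take s.length := h.eq_of_length_le hl
    rw [heq]
    exact List.take_prefix _ _
  · intro h
    have : t.take s.length = s := (List.prefix_iff_eq_take.mp h).symm
    rw [this]

theorem branch2_eq (candidate search_words : String) :
    PySem.Chars.isIn (PySem.Chars.lower search_words.toList)
      (PySem.Chars.lower (PySem.List.slice candidate.toList none (some (PySem.Chars.len search_words.toList))))
    = PySem.Chars.startswith (PySem.Chars.lower candidate.toList) (PySem.Chars.lower search_words.toList) := by
  have hlen : PySem.Chars.len search_words.toList = (search_words.toList.length : Int) := by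
    simp [PySem.Chars.len]
  rw [hlen, PySem.List.slice_to candidate.toList (by omega)]
  simp only [Int.toNat_natCast]
  have hmt : PySem.Chars.lower (candidate.toList.take search_words.toList.length)
      = (PySem.Chars.lower candidate.toList).take (PySem.Chars.lower search_words.toList).length := by
    simp [PySem.Chars.lower, List.map_take]
  rw [hmt]
  rcases Bool.eq_false_or_eq_true (PySem.Chars.startswith (PySem.Chars.lower candidate.toList) (PySem.Chars.lower search_words.toList)) with hb | hb <;> rw [hb]
  · rw [PySem.Chars.isIn_iff_infix, infix_take_iff_prefix]
    exact (PySem.Chars.startswith_iff _ _).mp hb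
  · rw [Bool.eq_false_iff]
    intro h
    rw [PySem.Chars.isIn_iff_infix, infix_take_iff_prefix, ← PySem.Chars.startswith_iff] at h
    rw [hb] at h
    exact absurd h (by simp)

-- ===== VERDICT (by name: the statement is the Claim_ definition above) =====
theorem search_filter_spec : Claim_equal_search_filter := by
  intro candidate search_words _
  show search_filter candidate search_words = search_filter_alt candidate search_words
  unfold search_filter search_filter_alt
  dsimp only
  rw [branch2_eq, fallbackA_eq, dedup_eq, allInIter_eq_scan]
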